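-- pv_equiv track=rewrite | github.com/orioledb/orioledb | test/t/rewind_test.py | _substract_lists
-- ===== SOURCE A (Python) =====
-- from collections import Counter
--
-- def _substract_lists(list1: list, list2: list) -> list:
-- 	remaining = Counter(list2)
-- 	result = []
-- 	for val in list1:
-- 		if remaining[val]:
-- 			remaining[val] -= 1
-- 		else:
-- 			result.append(val)
-- 	return sorted(result)
-- ===== SOURCE B (Python) =====
-- def _substract_lists(list1: list, list2: list) -> list:
--     a = sorted(list1)
--     b = sorted(list2)
--     out = []
--     i = j = 0
--     while i < len(a):
--         if j < len(b) and b[j] < a[i]: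
--             j += 1
--         elif j < len(b) and b[j] == a[i]:
--             i += 1
--             j += 1
--         else:
--             out.append(a[i])
--             i += 1
--     return out
-- ===== Notes on version B (the rewrite author's own statement) =====
-- stated objective: alternative
-- what changed: B keeps no frequency table: it sorts both lists first and walks them with a two-pointer merge, skipping one occurrence of each matched value and emitting the survivors already in order; A filters unsorted list1 against a Counter of list2 and sorts only at the end.
import Mathlib
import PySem

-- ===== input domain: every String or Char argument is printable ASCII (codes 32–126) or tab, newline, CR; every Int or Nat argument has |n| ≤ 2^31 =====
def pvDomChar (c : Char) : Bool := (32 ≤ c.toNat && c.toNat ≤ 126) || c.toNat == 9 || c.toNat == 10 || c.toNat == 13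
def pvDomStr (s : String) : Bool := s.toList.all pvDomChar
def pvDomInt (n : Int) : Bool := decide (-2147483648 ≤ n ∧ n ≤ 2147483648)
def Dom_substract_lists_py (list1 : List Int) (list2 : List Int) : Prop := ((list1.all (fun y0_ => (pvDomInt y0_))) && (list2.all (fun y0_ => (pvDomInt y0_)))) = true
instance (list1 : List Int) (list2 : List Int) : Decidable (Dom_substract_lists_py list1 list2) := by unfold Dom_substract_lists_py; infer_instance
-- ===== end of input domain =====

-- B keeps no frequency table: it sorts both lists and walks them with a two-pointer
-- merge, skipping one occurrence of each matched value; the output is emitted in order.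

-- ===== PORT A =====
-- remaining = Counter(list2); for val in list1: if remaining[val]: remaining[val] -= 1
-- else: result.append(val); return sorted(result)
def substract_lists_py (list1 : List Int) (list2 : List Int) : List Int :=
  let remaining := PySem.Dict.counter list2
  let st := list1.foldl (fun (st : PySem.Dict Int Int × List Int) val =>
    if st.1.getD val 0 ≠ 0 then (st.1.modify val 0 (· - 1), st.2)
    else (st.1, st.2 ++ [val])) (remaining, [])
  PySem.List.sorted st.2 (fun x => x) false

-- ===== PORT B =====
-- the while loop over indices i (into sorted a) and j (into sorted b), as the
-- corresponding structural recursion on the two remaining suffixes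
def msdiffMerge : List Int → List Int → List Int
  | [], _ => []
  | x :: a, [] => x :: a
  | x :: a, y :: b =>
      if y < x then msdiffMerge (x :: a) b          -- b[j] < a[i]: j += 1
      else if y = x then msdiffMerge a b            -- b[j] == a[i]: i += 1; j += 1
      else x :: msdiffMerge a (y :: b)              -- else: out.append(a[i]); i += 1
  termination_by a b => a.length + b.length

def substract_lists_py_alt (list1 : List Int) (list2 : List Int) : List Int :=
  msdiffMerge (PySem.List.sorted list1 (fun x => x) false)
    (PySem.List.sorted list2 (fun x => x) false)

-- ===== PRECONDITION & SPEC =====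
def Spec_substract_lists_py (list1 : List Int) (list2 : List Int) (out : List Int) : Prop := out = substract_lists_py_alt list1 list2
instance (list1 : List Int) (list2 : List Int) (out : List Int) : Decidable (Spec_substract_lists_py list1 list2 out) := by unfold Spec_substract_lists_py; infer_instance

-- ===== CLAIM (what is proved, stated in full; the proofs are below) =====
def Claim_equal_substract_lists_py : Prop := ∀ (list1 : List Int) (list2 : List Int), Dom_substract_lists_py list1 list2 → Spec_substract_lists_py list1 list2 (substract_lists_py list1 list2)

-- ===== LEMMAS AND PROOFS =====

-- A's loop invariant: the appended list counts what exceeds the remaining budget.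
theorem substract_loop_count (l : List Int) (d : PySem.Dict Int Int) (acc : List Int)
    (hd : ∀ v : Int, 0 ≤ d.getD v 0) (v : Int) :
    (((l.foldl (fun (st : PySem.Dict Int Int × List Int) val =>
        if st.1.getD val 0 ≠ 0 then (st.1.modify val 0 (· - 1), st.2)
        else (st.1, st.2 ++ [val])) (d, acc)).2.count v : Int))
      = (acc.count v : Int) + l.count v - min (l.count v : Int) (d.getD v 0) := by
  induction l generalizing d acc with
  | nil =>
    have := hd v
    simp only [List.foldl_nil, List.count_nil]
    omega
  | cons x t ih =>
    simp only [List.foldl_cons]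
    by_cases hx : d.getD x 0 ≠ 0
    · rw [if_pos hx]
      have hd' : ∀ w : Int, 0 ≤ (d.modify x 0 (· - 1)).getD w 0 := by
        intro w
        rw [PySem.Dict.getD_modify]
        by_cases hw : w = x
        · simp only [hw, if_true]
          have := hd x; omega
        · simp only [hw, if_false]; exact hd w
      rw [ih _ _ hd']
      by_cases hv : v = x
      · subst hv
        rw [PySem.Dict.getD_modify, if_pos rfl, List.count_cons_self]
        have := hd v
        push_cast
        omega
      · rw [PySem.Dict.getD_modify, if_neg hv, List.count_cons_of_ne (Ne.symm hv)]
    · rw [if_neg hx]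
      rw [ih _ _ hd]
      simp only [ne_eq, not_not] at hx
      by_cases hv : v = x
      · subst hv
        rw [hx, List.count_append, List.count_cons_self, List.count_cons_self,
          List.count_nil]
        push_cast
        omega
      · rw [List.count_append, List.count_cons_of_ne (Ne.symm hv),
          List.count_cons_of_ne (Ne.symm hv), List.count_nil]
        push_cast
        omega

-- The merge output is a sublist of its first argument (hence sorted when it is).
theorem msdiffMerge_sublist (a b : List Int) : (msdiffMerge a b).Sublist a := by
  fun_induction msdiffMerge a b with
  | case1 => exact List.nil_sublist _
  | case2 => exact List.Sublist.refl _
  | case3 x a y b h ih => exact ih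
  | case4 a x b hx ih => exact ih.trans (List.sublist_cons_self x a)
  | case5 x a y b h1 h2 ih => exact ih.cons₂ x

-- B's merge computes the multiset difference, per value, on sorted inputs.
theorem msdiffMerge_count (a b : List Int) (v : Int) :
    a.Pairwise (· ≤ ·) → b.Pairwise (· ≤ ·) →
    (msdiffMerge a b).count v = a.count v - min (a.count v) (b.count v) := by
  fun_induction msdiffMerge a b with
  | case1 b => intro _ _; simp
  | case2 x a => intro _ _; simp
  | case3 x a y b h ih =>
    intro ha hb
    have hb' : b.Pairwise (· ≤ ·) := hb.sublist (List.sublist_cons_self y b)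
    rw [ih ha hb']
    by_cases hv : v = y
    · subst hv
      have hv0 : (x :: a).count v = 0 := by
        rw [List.count_eq_zero]
        intro hmem
        rcases List.mem_cons.mp hmem with h1 | h1
        · omega
        · have := (List.pairwise_cons.mp ha).1 v h1
          omega
      omega
    · rw [List.count_cons_of_ne (Ne.symm hv)]
  | case4 a x b hx ih =>
    intro ha hb
    have ha' := (List.pairwise_cons.mp ha).2
    have hb' := (List.pairwise_cons.mp hb).2
    rw [ih ha' hb']
    by_cases hv : v = x
    · subst hv
      rw [List.count_cons_self, List.count_cons_self]
      omega
    · rw [List.count_cons_of_ne (Ne.symm hv), List.count_cons_of_ne (Ne.symm hv)]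
  | case5 x a y b h1 h2 ih =>
    intro ha hb
    have ha' := (List.pairwise_cons.mp ha).2
    rw [List.count_cons, ih ha' hb]
    by_cases hv : v = x
    · subst hv
      have hyb : (y :: b).count v = 0 := by
        rw [List.count_eq_zero]
        intro hmem
        rcases List.mem_cons.mp hmem with hm | hm
        · omega
        · have := (List.pairwise_cons.mp hb).1 v hm
          omega
      simp only [hyb]
      simp
    · have : ¬ x = v := fun hh => hv hh.symm
      simp [this]

-- B's output is a strictly ordered-by-≤ permutation of A's pre-sort result list.
theorem substract_lists_perm (list1 list2 : List Int) (v : Int) :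
    (substract_lists_py_alt list1 list2).count v
      = ((list1.foldl (fun (st : PySem.Dict Int Int × List Int) val =>
          if st.1.getD val 0 ≠ 0 then (st.1.modify val 0 (· - 1), st.2)
          else (st.1, st.2 ++ [val])) (PySem.Dict.counter list2, [])).2).count v := by
  have hA := substract_loop_count list1 (PySem.Dict.counter list2) [] (fun w => by
    rw [PySem.Dict.getD_counter]; exact_mod_cast Nat.zero_le _) v
  simp only [List.count_nil, Nat.cast_zero, zero_add, PySem.Dict.getD_counter] at hA
  unfold substract_lists_py_alt
  rw [msdiffMerge_count _ _ v (PySem.List.sorted_pairwise list1 (fun x => x))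
    (PySem.List.sorted_pairwise list2 (fun x => x))]
  rw [(PySem.List.sorted_perm list1 (fun x => x) false).count_eq,
    (PySem.List.sorted_perm list2 (fun x => x) false).count_eq]
  omega

-- ===== VERDICT (by name: the statement is the Claim_ definition above) =====
theorem substract_lists_py_spec : Claim_equal_substract_lists_py := by
  intro list1 list2 _
  show substract_lists_py list1 list2 = substract_lists_py_alt list1 list2
  have hperm : (substract_lists_py_alt list1 list2).Perm
      ((list1.foldl (fun (st : PySem.Dict Int Int × List Int) val =>
        if st.1.getD val 0 ≠ 0 then (st.1.modify val 0 (· - 1), st.2)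
        else (st.1, st.2 ++ [val])) (PySem.Dict.counter list2, [])).2) :=
    List.perm_iff_count.mpr (fun v => substract_lists_perm list1 list2 v)
  have hpair : (substract_lists_py_alt list1 list2).Pairwise (fun x y => x ≤ y) :=
    (PySem.List.sorted_pairwise list1 (fun x => x)).sublist (msdiffMerge_sublist _ _)
  exact PySem.List.sorted_id_eq_of_perm_of_pairwise _ _ hperm hpair
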